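-- pv_equiv track=rewrite | github.com/Nav31/furry-octo-fortnight | 5kyu/double_cola.py | whoIsNext
-- ===== SOURCE A (Python) =====
-- def whoIsNext(names, r):
--     count = 1
--     while count < r:
--         name = names.pop(0)
--         names.append(name)
--         names.append(name)
--         count += 1
--     return names[0]
-- ===== SOURCE B (Python) =====
-- def whoIsNext(names, r):
--     # Closed-form: skip whole rounds (round k has each name 2**k times),
--     # then index directly. Does not mutate names (A rotates it in place).
--     n = len(names)
--     i = max(r - 1, 0)
--     k = 0
--     while n and i >= n * (1 << k):
--         i -= n * (1 << k)
--         k += 1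
--     return names[i >> k]
-- ===== Notes on version B (the rewrite author's own statement) =====
-- stated objective: faster
-- what changed: Replaces the O(r) queue simulation (pop front, append twice, r-1 times) with closed-form skipping of whole geometric rounds (round k holds each name 2^k times) followed by one direct index, in O(log(r/n)); B also does not mutate names, while A rotates the list in place (return value is what is proved equal).
import Mathlib
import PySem

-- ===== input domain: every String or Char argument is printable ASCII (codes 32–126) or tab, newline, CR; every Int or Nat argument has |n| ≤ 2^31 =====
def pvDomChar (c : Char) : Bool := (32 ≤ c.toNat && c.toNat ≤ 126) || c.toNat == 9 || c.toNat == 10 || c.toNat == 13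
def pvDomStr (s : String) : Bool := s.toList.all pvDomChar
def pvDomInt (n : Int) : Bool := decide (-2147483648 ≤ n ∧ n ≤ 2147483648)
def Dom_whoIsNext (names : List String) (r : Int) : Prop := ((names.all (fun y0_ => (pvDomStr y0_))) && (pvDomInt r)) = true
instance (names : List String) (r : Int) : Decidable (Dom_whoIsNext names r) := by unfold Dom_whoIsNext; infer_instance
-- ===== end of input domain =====

-- B replaces A's O(r) queue simulation by closed-form skipping of geometric rounds (objective: faster).
-- A mutates `names` in place (rotates it); B does not — the equivalence proved here is about the RETURN value only.

-- ===== PORT A =====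
-- the while loop runs (r-1).toNat times; each iteration pops the front and appends it twice
def whoIsNextLoop : List String → Nat → List String
  | ns, 0 => ns
  | [], _ + 1 => []            -- names.pop(0) raises IndexError here (excluded by Pre_)
  | x :: rest, t + 1 => whoIsNextLoop (rest ++ [x, x]) t

def whoIsNext (names : List String) (r : Int) : String :=
  -- names[0]; under Pre_ the list stays nonempty, so headD's default is never used
  (whoIsNextLoop names (r - 1).toNat).headD ""

-- ===== PORT B =====
-- while n and i >= n * (1 << k): i -= n * (1 << k); k += 1
def whoIsNextAltLoop (n : Nat) (i k : Nat) : Nat × Nat :=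
  if h : 0 < n ∧ n * 2 ^ k ≤ i then whoIsNextAltLoop n (i - n * 2 ^ k) (k + 1) else (i, k)
  termination_by i
  decreasing_by
    have h1 : 1 ≤ 2 ^ k := Nat.one_le_two_pow
    have h2 : 1 ≤ n * 2 ^ k := Nat.le_trans h1 (Nat.le_mul_of_pos_left _ h.1)
    omega

def whoIsNext_alt (names : List String) (r : Int) : String :=
  let n := names.length
  let i := (max (r - 1) 0).toNat
  let p := whoIsNextAltLoop n i 0
  -- names[i >> k]; in range under Pre_ (else Python raises IndexError)
  (names[(p.1 >>> p.2)]?).getD ""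

-- ===== PRECONDITION & SPEC =====
-- Pre_ excludes exactly the inputs where Python A raises IndexError: names = [] (pop(0) resp. names[0]).
def Pre_whoIsNext (names : List String) (r : Int) : Prop := names ≠ []
instance (names : List String) (r : Int) : Decidable (Pre_whoIsNext names r) := by unfold Pre_whoIsNext; infer_instance
def pvWitness_whoIsNext : List String × Int := (["Sheldon", "Leonard", "Penny"], 6)

def Spec_whoIsNext (names : List String) (r : Int) (out : String) : Prop := out = whoIsNext_alt names r
instance (names : List String) (r : Int) (out : String) : Decidable (Spec_whoIsNext names r out) := by unfold Spec_whoIsNext; infer_instance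

-- ===== CLAIM (what is proved, stated in full; the proofs are below) =====
def Claim_equal_whoIsNext : Prop := ∀ (names : List String) (r : Int), Dom_whoIsNext names r → Pre_whoIsNext names r → Spec_whoIsNext names r (whoIsNext names r)

-- ===== LEMMAS AND PROOFS =====

-- each name doubled in place
def dupL (ns : List String) : List String := ns.flatMap (fun x => [x, x])

-- the common specification: the t-th (0-based) drink, by rounds
def specD (ns : List String) (t : Nat) : String :=
  if t < ns.length then (ns[t]?).getD ""
  else if _ : ns.length = 0 then ""
  else specD (dupL ns) (t - ns.length)
  termination_by t
  decreasing_by omega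

theorem dupL_nil : dupL [] = [] := rfl
theorem dupL_cons (x : String) (l : List String) : dupL (x :: l) = x :: x :: dupL l := rfl

theorem dupL_length (l : List String) : (dupL l).length = 2 * l.length := by
  induction l with
  | nil => rfl
  | cons x t ih => simp [dupL_cons, ih]; omega

theorem dupL_get? (l : List String) (i : Nat) : (dupL l)[i]? = l[i / 2]? := by
  induction l generalizing i with
  | nil => simp [dupL_nil]
  | cons x t ih =>
    match i with
    | 0 => simp [dupL_cons]
    | 1 => simp [dupL_cons]
    | j + 2 =>
      have hd : (j + 2) / 2 = j / 2 + 1 := by omega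
      simp [dupL_cons, ih, hd]

theorem loopA_nil (t : Nat) : whoIsNextLoop [] t = [] := by
  cases t <;> rfl

theorem loopA_char (t : Nat) (ns : List String) (h : t ≤ ns.length) :
    whoIsNextLoop ns t = ns.drop t ++ dupL (ns.take t) := by
  induction t generalizing ns with
  | zero => simp [whoIsNextLoop, dupL_nil]
  | succ t ih =>
    match ns with
    | [] => simp at h
    | x :: rest =>
      have hr : t ≤ rest.length := by simp only [List.length_cons] at h; omega
      have h' : t ≤ (rest ++ [x, x]).length := by
        simp only [List.length_append, List.length_cons, List.length_nil]; omega
      rw [whoIsNextLoop, ih _ h', List.drop_append_of_le_length hr, List.take_append_of_le_length hr]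
      simp [dupL_cons]

theorem loopA_add (a b : Nat) (ns : List String) :
    whoIsNextLoop ns (a + b) = whoIsNextLoop (whoIsNextLoop ns a) b := by
  induction a generalizing ns with
  | zero => simp [whoIsNextLoop]
  | succ a ih =>
    match ns with
    | [] => simp [loopA_nil]
    | x :: rest =>
      have : a + 1 + b = (a + b) + 1 := by omega
      rw [this, whoIsNextLoop, whoIsNextLoop, ih]

theorem A_eq_spec (t : Nat) (ns : List String) (h : ns ≠ []) :
    (whoIsNextLoop ns t).headD "" = specD ns t := by
  induction t using Nat.strong_induction_on generalizing ns with
  | _ t ih =>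
    have hn : 0 < ns.length := List.length_pos_iff.mpr h
    by_cases hlt : t < ns.length
    · rw [loopA_char t ns (le_of_lt hlt), specD, if_pos hlt]
      have hdrop : ns[t]? = (ns.drop t).head? := List.head?_drop.symm
      have hne : ns.drop t ≠ [] := by
        intro hc
        rw [List.drop_eq_nil_iff] at hc; omega
      match hd : ns.drop t with
      | [] => exact absurd hd hne
      | y :: ys => simp [hd, hdrop]
    · -- t ≥ length: one full round then recurse
      have hsplit : t = ns.length + (t - ns.length) := by omega
      have hA : whoIsNextLoop ns t = whoIsNextLoop (dupL ns) (t - ns.length) := by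
        conv_lhs => rw [hsplit]
        rw [loopA_add, loopA_char ns.length ns (le_refl _)]
        simp only [List.drop_length, List.take_length, List.nil_append]
      rw [specD, if_neg hlt, dif_neg (by omega), hA]
      have hdne : dupL ns ≠ [] := by
        intro hc
        have h2 := dupL_length ns
        rw [hc] at h2
        simp only [List.length_nil] at h2
        omega
      have hdec : t - ns.length < t := by omega
      exact ih (t - ns.length) hdec (dupL ns) hdne

-- iterated duplication
def dupIter : Nat → List String → List String
  | 0, ns => ns
  | k + 1, ns => dupIter k (dupL ns)

theorem dupIter_succ_outer (k : Nat) (ns : List String) :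
    dupIter (k + 1) ns = dupL (dupIter k ns) := by
  induction k generalizing ns with
  | zero => rfl
  | succ k ih => rw [dupIter, ih, dupIter]

theorem dupIter_length (k : Nat) (ns : List String) :
    (dupIter k ns).length = ns.length * 2 ^ k := by
  induction k generalizing ns with
  | zero => simp [dupIter]
  | succ k ih => rw [dupIter, ih, dupL_length, pow_succ]; ring

theorem dupIter_get? (k : Nat) (ns : List String) (i : Nat) :
    (dupIter k ns)[i]? = ns[i / 2 ^ k]? := by
  induction k generalizing ns i with
  | zero => simp [dupIter]
  | succ k ih =>
    rw [dupIter, ih, dupL_get?, Nat.div_div_eq_div_mul, ← pow_succ]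

theorem B_eq_spec (i k : Nat) (ns : List String) (h : ns ≠ []) :
    specD (dupIter k ns) i =
      (ns[((whoIsNextAltLoop ns.length i k).1 >>> (whoIsNextAltLoop ns.length i k).2)]?).getD "" := by
  induction i using Nat.strong_induction_on generalizing k with
  | _ i ih =>
    have hn : 0 < ns.length := List.length_pos_iff.mpr h
    by_cases hg : ns.length * 2 ^ k ≤ i
    · have h1 : 1 ≤ 2 ^ k := Nat.one_le_two_pow
      have hpos : 0 < ns.length * 2 ^ k := Nat.mul_pos hn h1
      rw [whoIsNextAltLoop, dif_pos ⟨hn, hg⟩]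
      have hlen : (dupIter k ns).length = ns.length * 2 ^ k := dupIter_length k ns
      rw [specD, if_neg (by omega), dif_neg (by omega), ← dupIter_succ_outer, hlen]
      exact ih (i - ns.length * 2 ^ k) (by omega) (k + 1)
    · rw [whoIsNextAltLoop, dif_neg (by tauto)]
      have hlen : (dupIter k ns).length = ns.length * 2 ^ k := dupIter_length k ns
      rw [specD, if_pos (by omega), dupIter_get?, Nat.shiftRight_eq_div_pow]

-- ===== VERDICT (by name: the statement is the Claim_ definition above) =====
theorem whoIsNext_spec : Claim_equal_whoIsNext := by
  intro names r _ hpre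
  unfold Spec_whoIsNext whoIsNext whoIsNext_alt
  have hmax : (max (r - 1) 0).toNat = (r - 1).toNat := by omega
  rw [hmax, A_eq_spec _ _ hpre]
  have := B_eq_spec ((r - 1).toNat) 0 names hpre
  simpa [dupIter] using this
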